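-- pv_equiv track=rewrite | github.com/mvarrone/stp-per-vlan-project | backend/graph/code.py | obtain_some_values_from_version_command
-- ===== SOURCE A (Python) =====
-- from typing import List, Dict, Any, Tuple, Union
--
-- def obtain_some_values_from_version_command(parsed_version_output: List[Dict[str, str]], device_type: str) -> Tuple[str, str, str]:
--     if device_type == "cisco_ios":
--         # Initialize default values
--         version = ''
--         serial = ''
--         uptime = ''
--
--         # Process parsed_version_output
--         for entry in parsed_version_output:
--             if 'version' in entry:
--                 version = entry['version']
--             if 'serial' in entry:
--                 serial = entry['serial']
--             if 'uptime' in entry: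
--                 uptime = entry['uptime']
--
--         return version, serial, uptime
--     return "N/A", "N/A", "N/A"
-- ===== SOURCE B (Python) =====
-- def obtain_some_values_from_version_command(parsed_version_output, device_type):
--     if device_type == "cisco_ios":
--         version = next((e['version'] for e in reversed(parsed_version_output) if 'version' in e), '')
--         serial = next((e['serial'] for e in reversed(parsed_version_output) if 'serial' in e), '')
--         uptime = next((e['uptime'] for e in reversed(parsed_version_output) if 'uptime' in e), '')
--         return version, serial, uptime
--     return "N/A", "N/A", "N/A"
-- ===== Notes on version B (the rewrite author's own statement) =====
-- stated objective: simpler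
-- what changed: Replaces the single accumulating loop maintaining three variables with three independent reversed scans, each taking the first match in reverse (last-seen value) with an empty-string default.
import Mathlib
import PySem

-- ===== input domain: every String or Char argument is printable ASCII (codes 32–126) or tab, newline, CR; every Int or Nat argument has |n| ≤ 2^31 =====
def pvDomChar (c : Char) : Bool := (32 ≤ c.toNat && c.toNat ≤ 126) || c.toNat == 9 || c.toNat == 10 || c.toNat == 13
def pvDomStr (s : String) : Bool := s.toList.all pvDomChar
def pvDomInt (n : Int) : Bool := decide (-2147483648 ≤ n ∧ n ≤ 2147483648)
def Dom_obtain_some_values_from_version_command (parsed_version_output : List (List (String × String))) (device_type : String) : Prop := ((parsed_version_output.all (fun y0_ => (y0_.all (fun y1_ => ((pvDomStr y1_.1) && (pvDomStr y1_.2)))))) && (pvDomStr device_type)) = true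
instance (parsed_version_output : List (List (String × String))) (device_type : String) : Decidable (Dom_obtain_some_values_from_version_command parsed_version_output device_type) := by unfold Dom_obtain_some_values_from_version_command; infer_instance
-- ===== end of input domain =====

-- ===== PORT A =====
-- Honest line: B replaces A's single accumulating loop by three independent
-- reversed first-match scans (objective: simpler decomposition; same cost).
-- entry[k] / 'k in entry' on an assoc-list dict: first matching pair (exact for Python dict, keys unique per entry).
def pvGetKey (e : List (String × String)) (k : String) : Option String :=
  (e.find? (fun kv => kv.1 == k)).map (·.2)
def obtain_some_values_from_version_command (parsed_version_output : List (List (String × String))) (device_type : String) : String × String × String :=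
  if device_type == "cisco_ios" then
    parsed_version_output.foldl (fun (acc : String × String × String) entry =>
      let v := match pvGetKey entry "version" with | some x => x | none => acc.1
      let s := match pvGetKey entry "serial" with | some x => x | none => acc.2.1
      let u := match pvGetKey entry "uptime" with | some x => x | none => acc.2.2
      (v, s, u)) ("", "", "")
  else ("N/A", "N/A", "N/A")

-- ===== PORT B =====
-- next((e[k] for e in reversed(p) if k in e), '')
def pvLastKey (parsed_version_output : List (List (String × String))) (k : String) : String :=
  match parsed_version_output.reverse.find? (fun e => (pvGetKey e k).isSome) with
  | some e => (pvGetKey e k).getD ""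
  | none => ""

def obtain_some_values_from_version_command_alt (parsed_version_output : List (List (String × String))) (device_type : String) : String × String × String :=
  if device_type == "cisco_ios" then
    (pvLastKey parsed_version_output "version",
     pvLastKey parsed_version_output "serial",
     pvLastKey parsed_version_output "uptime")
  else ("N/A", "N/A", "N/A")

-- ===== PRECONDITION & SPEC =====
def Spec_obtain_some_values_from_version_command (parsed_version_output : List (List (String × String))) (device_type : String) (out : String × String × String) : Prop := out = obtain_some_values_from_version_command_alt parsed_version_output device_type
instance (parsed_version_output : List (List (String × String))) (device_type : String) (out : String × String × String) : Decidable (Spec_obtain_some_values_from_version_command parsed_version_output device_type out) := by unfold Spec_obtain_some_values_from_version_command; infer_instance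

-- ===== CLAIM =====
def Claim_equal_obtain_some_values_from_version_command : Prop := ∀ (parsed_version_output : List (List (String × String))) (device_type : String), Dom_obtain_some_values_from_version_command parsed_version_output device_type → Spec_obtain_some_values_from_version_command parsed_version_output device_type (obtain_some_values_from_version_command parsed_version_output device_type)

-- ===== LEMMAS AND PROOFS =====

-- A single-key accumulating pass equals the reverse first-match scan.
theorem pvFold_last (p : List (List (String × String))) (k : String) (d : String) :
    p.foldl (fun (a : String) e => match pvGetKey e k with | some x => x | none => a) d
    = match p.reverse.find? (fun e => (pvGetKey e k).isSome) with
      | some e => (pvGetKey e k).getD ""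
      | none => d := by
  induction p generalizing d with
  | nil => simp
  | cons e t ih =>
    simp only [List.foldl_cons, List.reverse_cons, List.find?_append, ih]
    cases h : t.reverse.find? (fun e => (pvGetKey e k).isSome) with
    | some e' => simp [Option.or]
    | none =>
      simp only [Option.none_or]
      cases hg : pvGetKey e k with
      | some x => simp [List.find?, hg]
      | none => simp [List.find?, hg]

-- The joint triple fold is the three single-key folds, componentwise.
theorem pvFold_split (p : List (List (String × String))) (d : String × String × String) :
    p.foldl (fun (acc : String × String × String) entry =>
      let v := match pvGetKey entry "version" with | some x => x | none => acc.1
      let s := match pvGetKey entry "serial" with | some x => x | none => acc.2.1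
      let u := match pvGetKey entry "uptime" with | some x => x | none => acc.2.2
      (v, s, u)) d
    = (p.foldl (fun (a : String) e => match pvGetKey e "version" with | some x => x | none => a) d.1,
       p.foldl (fun (a : String) e => match pvGetKey e "serial" with | some x => x | none => a) d.2.1,
       p.foldl (fun (a : String) e => match pvGetKey e "uptime" with | some x => x | none => a) d.2.2) := by
  induction p generalizing d with
  | nil => simp
  | cons e t ih => simp [List.foldl_cons, ih]

-- ===== VERDICT =====
theorem obtain_some_values_from_version_command_spec : Claim_equal_obtain_some_values_from_version_command := by
  intro p dt _
  unfold Spec_obtain_some_values_from_version_command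
  unfold obtain_some_values_from_version_command obtain_some_values_from_version_command_alt
  by_cases h : dt == "cisco_ios"
  · simp only [h, pvFold_split, pvFold_last, pvLastKey]
  · simp [h]
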